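-- pv_equiv track=rewrite | github.com/gustavoisidio/avoidingoverfitting | functions.py | transformMatrixToVector
-- ===== SOURCE A (Python) =====
-- def transformMatrixToVector(matrix):
--     vector=[]
--     for elem in matrix:
--         if elem == 1:
--             vector.append(1)
--         else: #i.e == 0
--             vector.append(-1)
--     # se o primeiro elemento for 0, ele inverte os valores do vetor/matrix
--     if (vector[0] == -1):
--         vector = [i*-1 for i in vector]
--     return vector
-- ===== SOURCE B (Python) =====
-- def transformMatrixToVector(matrix):
--     b0 = (matrix[0] == 1)
--     return [1 if (e == 1) == b0 else -1 for e in matrix]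
-- ===== Notes on version B (the rewrite author's own statement) =====
-- stated objective: simpler
-- what changed: Replaces build-then-conditionally-invert (two passes, intermediate list) by a single comprehension emitting +1 when the element agrees with the first element and -1 otherwise.
import Mathlib
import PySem

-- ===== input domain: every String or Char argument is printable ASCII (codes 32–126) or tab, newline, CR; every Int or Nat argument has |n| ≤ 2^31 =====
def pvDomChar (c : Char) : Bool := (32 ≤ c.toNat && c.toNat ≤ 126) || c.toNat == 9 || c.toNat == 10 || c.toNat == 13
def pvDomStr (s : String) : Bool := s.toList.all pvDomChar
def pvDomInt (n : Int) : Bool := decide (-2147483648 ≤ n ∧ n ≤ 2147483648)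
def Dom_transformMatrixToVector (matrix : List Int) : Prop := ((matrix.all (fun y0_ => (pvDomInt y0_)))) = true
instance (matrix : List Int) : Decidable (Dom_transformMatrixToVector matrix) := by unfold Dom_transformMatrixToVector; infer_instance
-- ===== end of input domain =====

-- B replaces A's build-±1-list-then-conditionally-invert (two passes, intermediate list) by a
-- single pass comparing each element with the first element; simpler, same cost.

-- ===== PORT A =====
-- A: builds vector (1 for elem==1 else -1), then inverts the whole vector if vector[0]==-1.
def transformMatrixToVector (matrix : List Int) : List Int :=
  let vector := matrix.foldl (fun v elem => if elem = 1 then v ++ [1] else v ++ [-1]) []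
  match PySem.List.pyGet? vector 0 with
  | none => []  -- Python raises IndexError here (empty matrix); excluded by Pre_
  | some v0 => if v0 = -1 then vector.map (fun i => i * -1) else vector

-- ===== PORT B =====
-- B: b0 = (matrix[0] == 1); [1 if (e == 1) == b0 else -1 for e in matrix]
def transformMatrixToVector_alt (matrix : List Int) : List Int :=
  match PySem.List.pyGet? matrix 0 with
  | none => []  -- Python raises IndexError here (empty matrix); excluded by Pre_
  | some m0 =>
    let b0 := decide (m0 = 1)
    matrix.map (fun e => if decide (e = 1) = b0 then 1 else -1)

-- ===== PRECONDITION & SPEC =====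
-- Pre_ excludes exactly the empty list, on which A raises IndexError (vector[0]).
def Pre_transformMatrixToVector (matrix : List Int) : Prop := matrix ≠ []
instance (matrix : List Int) : Decidable (Pre_transformMatrixToVector matrix) := by unfold Pre_transformMatrixToVector; infer_instance
def pvWitness_transformMatrixToVector : List Int := [1, 0, 1]

def Spec_transformMatrixToVector (matrix : List Int) (out : List Int) : Prop := out = transformMatrixToVector_alt matrix
instance (matrix : List Int) (out : List Int) : Decidable (Spec_transformMatrixToVector matrix out) := by unfold Spec_transformMatrixToVector; infer_instance

-- ===== CLAIM (what is proved, stated in full; the proofs are below) =====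
def Claim_equal_transformMatrixToVector : Prop := ∀ (matrix : List Int), Dom_transformMatrixToVector matrix → Pre_transformMatrixToVector matrix → Spec_transformMatrixToVector matrix (transformMatrixToVector matrix)

-- ===== LEMMAS AND PROOFS =====

-- A's foldl-append loop builds exactly the map.
theorem pvr_foldl_eq_map (matrix : List Int) (acc : List Int) :
    matrix.foldl (fun v elem => if elem = 1 then v ++ [1] else v ++ [-1]) acc
      = acc ++ matrix.map (fun e => if e = 1 then (1 : Int) else -1) := by
  induction matrix generalizing acc with
  | nil => simp
  | cons h t ih =>
    simp only [List.foldl_cons, List.map_cons, ih]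
    by_cases hh : h = 1 <;> simp [hh]

theorem transformMatrixToVector_spec' (matrix : List Int) (h : matrix ≠ []) :
    transformMatrixToVector matrix = transformMatrixToVector_alt matrix := by
  cases matrix with
  | nil => exact absurd rfl h
  | cons m0 t =>
    unfold transformMatrixToVector transformMatrixToVector_alt
    simp only [pvr_foldl_eq_map, List.nil_append, List.map_cons]
    have hget : PySem.List.pyGet? ((m0 :: t)) (0 : Int)
        = some m0 := by simp [PySem.List.pyGet?, PySem.List.pyIdx?]
    have hget2 : PySem.List.pyGet?
        ((if m0 = 1 then (1:Int) else -1) :: t.map (fun e => if e = 1 then (1:Int) else -1)) (0 : Int)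
        = some (if m0 = 1 then (1:Int) else -1) := by
      simp [PySem.List.pyGet?, PySem.List.pyIdx?]
    rw [hget2, hget]
    by_cases hm : m0 = 1
    · simp only [hm]
      norm_num
    · simp only [if_neg hm]
      norm_num [hm]
      intro a _
      by_cases he : a = 1 <;> simp [he]

-- ===== VERDICT (by name: the statement is the Claim_ definition above) =====
theorem transformMatrixToVector_spec : Claim_equal_transformMatrixToVector := by
  intro matrix _ hpre
  exact transformMatrixToVector_spec' matrix hpre
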